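-- pv_equiv track=rewrite | github.com/mmorgano/aiveritas | src/validator.py | _split_column_tokens
-- ===== SOURCE A (Python) =====
-- def _split_column_tokens(column_name: str) -> set[str]:
--     """Split a column name into normalized alphanumeric tokens."""
--     token = []
--     tokens: set[str] = set()
--
--     for character in column_name.casefold():
--         if character.isalnum():
--             token.append(character)
--             continue
--
--         if token:
--             tokens.add("".join(token))
--             token = []
--
--     if token:
--         tokens.add("".join(token))
--
--     return tokens
-- ===== SOURCE B (Python) =====
-- def _split_column_tokens(column_name: str) -> set[str]:
--     """Split a column name into normalized alphanumeric tokens.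
--
--     Run-grouping re-implementation: cut the casefolded string into maximal
--     runs of characters that agree on isalnum (a hand-rolled groupby), then
--     keep the alphanumeric runs via a set comprehension.
--     """
--     def group_runs(s):
--         runs = []
--         while s:
--             k = s[0].isalnum()
--             j = 1
--             while j < len(s) and s[j].isalnum() == k:
--                 j += 1
--             runs.append((k, s[:j]))
--             s = s[j:]
--         return runs
--
--     return {run for is_alnum, run in group_runs(column_name.casefold()) if is_alnum}
-- ===== Notes on version B (the rewrite author's own statement) =====
-- stated objective: alternative
-- what changed: Replaced the per-character token-buffer/flush loop with predicate-based run grouping (a hand-rolled groupby over isalnum) followed by a filtering set comprehension.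
import Mathlib
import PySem

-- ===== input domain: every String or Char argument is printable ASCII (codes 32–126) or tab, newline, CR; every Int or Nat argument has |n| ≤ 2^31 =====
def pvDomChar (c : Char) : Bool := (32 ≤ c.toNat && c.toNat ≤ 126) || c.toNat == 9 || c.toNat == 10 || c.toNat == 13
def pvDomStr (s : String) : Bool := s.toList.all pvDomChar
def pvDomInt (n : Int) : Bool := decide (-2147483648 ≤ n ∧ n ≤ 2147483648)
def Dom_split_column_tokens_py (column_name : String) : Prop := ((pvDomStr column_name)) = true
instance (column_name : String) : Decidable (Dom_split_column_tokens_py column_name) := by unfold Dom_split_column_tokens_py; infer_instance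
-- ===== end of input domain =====

-- B replaces A's per-character token-buffer/flush loop by predicate-based run grouping
-- (a hand-rolled groupby over isalnum) plus a filtering set comprehension (objective: alternative).
-- casefold is ported as lower: exact on the ASCII domain Dom_.

-- ===== PORT A =====
-- the for-loop of A, carrying its two mutable variables (token, tokens)
def splitA_loop : List Char → List Char → PySem.Set String → List Char × PySem.Set String
  | [], token, tokens => (token, tokens)
  | c :: rest, token, tokens =>
    if PySem.Chars.isalnum c then
      splitA_loop rest (token ++ [c]) tokens
    else if token.isEmpty then
      splitA_loop rest token tokens
    else
      splitA_loop rest [] (PySem.Set.add tokens (String.mk token))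

def split_column_tokens_py (column_name : String) : List String :=
  let st := splitA_loop (PySem.Chars.lower column_name.toList) [] []
  if st.1.isEmpty then st.2 else PySem.Set.add st.2 (String.mk st.1)

-- ===== PORT B =====
-- group_runs of Source B: maximal runs of characters agreeing on the key
def groupRuns (key : Char → Bool) : List Char → List (Bool × List Char)
  | [] => []
  | c :: cs =>
    let k := key c
    let p := cs.span (fun x => key x == k)
    (k, c :: p.1) :: groupRuns key p.2
termination_by l => l.length
decreasing_by
  simp only [List.span_eq_takeWhile_dropWhile]
  exact Nat.lt_succ_of_le (List.length_dropWhile_le _ _)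

def split_column_tokens_py_alt (column_name : String) : List String :=
  PySem.Set.ofList
    (((groupRuns PySem.Chars.isalnum (PySem.Chars.lower column_name.toList)).filter
        (fun g => g.1)).map (fun g => String.mk g.2))

-- ===== PRECONDITION & SPEC =====
def Spec_split_column_tokens_py (column_name : String) (out : List String) : Prop := out = split_column_tokens_py_alt column_name
instance (column_name : String) (out : List String) : Decidable (Spec_split_column_tokens_py column_name out) := by unfold Spec_split_column_tokens_py; infer_instance

-- ===== CLAIM (what is proved, stated in full; the proofs are below) =====
def Claim_equal_split_column_tokens_py : Prop := ∀ (column_name : String), Dom_split_column_tokens_py column_name → Spec_split_column_tokens_py column_name (split_column_tokens_py column_name)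

-- ===== LEMMAS AND PROOFS =====

-- the sequence of tokens A's loop emits, in order, given the current buffer
def tokensFrom : List Char → List Char → List String
  | token, [] => if token.isEmpty then [] else [String.mk token]
  | token, c :: cs =>
    if PySem.Chars.isalnum c then tokensFrom (token ++ [c]) cs
    else if token.isEmpty then tokensFrom token cs
    else String.mk token :: tokensFrom [] cs

lemma flush_splitA_loop (cs : List Char) : ∀ (token : List Char) (tokens : PySem.Set String),
    (if (splitA_loop cs token tokens).1.isEmpty then (splitA_loop cs token tokens).2
     else PySem.Set.add (splitA_loop cs token tokens).2 (String.mk (splitA_loop cs token tokens).1))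
      = PySem.Set.update tokens (tokensFrom token cs) := by
  induction cs with
  | nil =>
    intro token tokens
    simp only [splitA_loop, tokensFrom]
    by_cases h : token.isEmpty
    · simp [h, PySem.Set.update]
    · simp [h, PySem.Set.update]
  | cons c cs ih =>
    intro token tokens
    simp only [splitA_loop, tokensFrom]
    by_cases ha : PySem.Chars.isalnum c
    · simp only [ha, if_true]
      exact ih (token ++ [c]) tokens
    · by_cases h : token.isEmpty
      · simp only [ha, h, if_false, if_true, Bool.false_eq_true]
        exact ih token tokens
      · simp only [ha, h, if_false, Bool.false_eq_true]
        rw [ih [] (PySem.Set.add tokens (String.mk token))]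
        simp [PySem.Set.update]

lemma tokensFrom_alnum_run : ∀ (run rest token : List Char), token ≠ [] →
    (∀ x ∈ run, PySem.Chars.isalnum x = true) →
    (∀ d ∈ rest.head?, PySem.Chars.isalnum d = false) →
    tokensFrom token (run ++ rest) = String.mk (token ++ run) :: tokensFrom [] rest := by
  intro run
  induction run with
  | nil =>
    intro rest token htok _ hrest
    cases rest with
    | nil => simp [tokensFrom, htok]
    | cons d tl =>
      have hd : PySem.Chars.isalnum d = false := hrest d (by simp)
      simp [tokensFrom, hd, htok]
  | cons a run ih =>
    intro rest token htok hrun hrest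
    have ha : PySem.Chars.isalnum a = true := hrun a (by simp)
    simp only [List.cons_append, tokensFrom, ha, if_true]
    rw [ih rest (token ++ [a]) (by simp) (fun x hx => hrun x (by simp [hx])) hrest]
    simp

lemma tokensFrom_nonalnum_run : ∀ (run rest : List Char),
    (∀ x ∈ run, PySem.Chars.isalnum x = false) →
    tokensFrom [] (run ++ rest) = tokensFrom [] rest := by
  intro run
  induction run with
  | nil => intro rest _; rfl
  | cons a run ih =>
    intro rest hrun
    have ha : PySem.Chars.isalnum a = false := hrun a (by simp)
    simp only [List.cons_append, tokensFrom, ha, Bool.false_eq_true, if_false, List.isEmpty_nil,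
      if_true]
    exact ih rest (fun x hx => hrun x (by simp [hx]))

lemma tokensFrom_eq_groups : ∀ (n : ℕ) (cs : List Char), cs.length ≤ n →
    tokensFrom [] cs
      = ((groupRuns PySem.Chars.isalnum cs).filter (fun g => g.1)).map (fun g => String.mk g.2) := by
  intro n
  induction n with
  | zero =>
    intro cs hcs
    have : cs = [] := List.length_eq_zero_iff.mp (Nat.le_zero.mp hcs)
    subst this; simp [groupRuns, tokensFrom]
  | succ n ih =>
    intro cs hcs
    cases cs with
    | nil => simp [groupRuns, tokensFrom]
    | cons c cs' =>
      rw [groupRuns]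
      simp only [List.span_eq_takeWhile_dropWhile]
      set k := PySem.Chars.isalnum c with hk
      set tk := cs'.takeWhile (fun x => PySem.Chars.isalnum x == k) with htk
      set dr := cs'.dropWhile (fun x => PySem.Chars.isalnum x == k) with hdr
      have hsplit : tk ++ dr = cs' := List.takeWhile_append_dropWhile
      have hdrlen : dr.length ≤ n := by
        have h1 := List.length_dropWhile_le (fun x => PySem.Chars.isalnum x == k) cs'
        rw [← hdr] at h1
        simp only [List.length_cons] at hcs
        omega
      have htkmem : ∀ x ∈ tk, (PySem.Chars.isalnum x == k) = true := by
        intro x hx; rw [htk] at hx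
        exact List.mem_takeWhile_imp (p := fun x => PySem.Chars.isalnum x == k) hx
      have hdrhead : ∀ d ∈ dr.head?, (PySem.Chars.isalnum d == k) = false := by
        intro d hd
        have H := List.head?_dropWhile_not (fun x => PySem.Chars.isalnum x == k) cs'
        rw [← hdr] at H
        cases hdrc : dr with
        | nil => rw [hdrc] at hd; simp at hd
        | cons e tl =>
          rw [hdrc] at hd H
          simp only [List.head?_cons, Option.mem_some_iff] at hd
          subst hd
          simpa using H
      have hih := ih dr hdrlen
      cases hkc : k with
      | true =>
        have htkT : ∀ x ∈ tk, PySem.Chars.isalnum x = true := by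
          intro x hx; have := htkmem x hx; rw [hkc] at this; simpa using this
        have hdrF : ∀ d ∈ dr.head?, PySem.Chars.isalnum d = false := by
          intro d hd; have := hdrhead d hd; rw [hkc] at this; simpa using this
        have hcT : PySem.Chars.isalnum c = true := by rw [← hk]; exact hkc
        calc tokensFrom [] (c :: cs')
            = tokensFrom [c] (tk ++ dr) := by
              rw [hsplit]; simp [tokensFrom, hcT]
          _ = String.mk ([c] ++ tk) :: tokensFrom [] dr :=
              tokensFrom_alnum_run tk dr [c] (by simp) htkT hdrF
          _ = _ := by
              rw [hih]; simp
      | false =>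
        have htkF : ∀ x ∈ tk, PySem.Chars.isalnum x = false := by
          intro x hx; have := htkmem x hx; rw [hkc] at this; simpa using this
        have hcF : PySem.Chars.isalnum c = false := by rw [← hk]; exact hkc
        calc tokensFrom [] (c :: cs')
            = tokensFrom [] (tk ++ dr) := by
              rw [hsplit]; simp [tokensFrom, hcF]
          _ = tokensFrom [] dr := tokensFrom_nonalnum_run tk dr htkF
          _ = _ := by rw [hih]; simp

-- ===== VERDICT (by name: the statement is the Claim_ definition above) =====
theorem split_column_tokens_py_spec : Claim_equal_split_column_tokens_py := by
  intro cn _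
  unfold Spec_split_column_tokens_py split_column_tokens_py split_column_tokens_py_alt
  simp only []
  rw [flush_splitA_loop, PySem.Set.update_nil_left,
    tokensFrom_eq_groups (PySem.Chars.lower cn.toList).length _ (le_refl _)]
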